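-- pv_equiv track=rewrite | github.com/Ch3m1stryK1ng/sourceagent | sourceagent/pipeline/verdict_calibration.py | _strongest_check_strength
-- ===== SOURCE A (Python) =====
-- from typing import Any, Dict, Iterable, List, Mapping, Optional, Sequence, Tuple
--
-- def _strongest_check_strength(checks: Sequence[Mapping[str, Any]]) -> str:
--     order = {"effective": 3, "weak": 2, "absent": 1, "unknown": 0}
--     best = "unknown"
--     best_rank = -1
--     for row in checks:
--         cur = str(row.get("strength", "unknown") or "unknown")
--         rank = order.get(cur, 0)
--         if rank > best_rank:
--             best_rank = rank
--             best = cur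
--     return best
-- ===== SOURCE B (Python) =====
-- def _strongest_check_strength(checks):
--     labels = [str(row.get("strength", "unknown") or "unknown") for row in checks]
--     present = set(labels)
--     for name in ("effective", "weak", "absent"):
--         if name in present:
--             return name
--     return labels[0] if labels else "unknown"
-- ===== Notes on version B (the rewrite author's own statement) =====
-- stated objective: idiomatic
-- what changed: Replaces the running best/best_rank scan with a presence set over the normalized labels and a lookup along the fixed priority tuple, falling back to the first label (or 'unknown' for empty input).
import Mathlib
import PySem

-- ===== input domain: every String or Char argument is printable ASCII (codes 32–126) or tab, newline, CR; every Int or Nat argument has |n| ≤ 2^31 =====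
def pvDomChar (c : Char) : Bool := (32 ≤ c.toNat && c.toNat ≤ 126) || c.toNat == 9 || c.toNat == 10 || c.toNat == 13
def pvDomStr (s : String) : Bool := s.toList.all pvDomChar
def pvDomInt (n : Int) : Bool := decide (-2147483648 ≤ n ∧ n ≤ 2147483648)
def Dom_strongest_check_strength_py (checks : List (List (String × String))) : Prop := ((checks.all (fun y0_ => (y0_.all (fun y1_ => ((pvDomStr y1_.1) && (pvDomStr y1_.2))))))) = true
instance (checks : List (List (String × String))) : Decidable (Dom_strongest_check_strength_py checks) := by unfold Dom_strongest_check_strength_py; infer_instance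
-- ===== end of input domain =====

-- B is an idiomatic re-implementation: a presence set over the normalized labels is probed
-- along the fixed priority tuple, with a first-label/'unknown' fallback, instead of A's
-- running best/best_rank scan. Same cost; the return values are proved equal.

-- ===== PORT A =====
-- str(row.get("strength", "unknown") or "unknown")  (the values are strings, so str() is
-- the identity and 'or' replaces exactly the empty string); shared by both ports because
-- both Python versions contain this same row expression.
def pvNormLabel (row : List (String × String)) : String :=
  let v := (PySem.Dict.mk row).getD "strength" "unknown"
  if v = "" then "unknown" else v

def strongest_check_strength_py (checks : List (List (String × String))) : String :=
  let order : PySem.Dict String Int :=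
    PySem.Dict.mk [("effective", 3), ("weak", 2), ("absent", 1), ("unknown", 0)]
  (checks.foldl (fun s row =>
      let cur := pvNormLabel row
      let rank := order.getD cur 0
      if rank > s.2 then (cur, rank) else s)
    ("unknown", -1)).1

-- ===== PORT B =====
def strongest_check_strength_py_alt (checks : List (List (String × String))) : String :=
  let labels := checks.map pvNormLabel
  let present : PySem.Set String := PySem.Set.ofList labels
  match ["effective", "weak", "absent"].find? (fun name => PySem.Set.contains present name) with
  | some name => name
  | none => match labels with
            | [] => "unknown"
            | l :: _ => l

-- ===== PRECONDITION & SPEC =====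
def Spec_strongest_check_strength_py (checks : List (List (String × String))) (out : String) : Prop := out = strongest_check_strength_py_alt checks
instance (checks : List (List (String × String))) (out : String) : Decidable (Spec_strongest_check_strength_py checks out) := by unfold Spec_strongest_check_strength_py; infer_instance

-- ===== CLAIM (what is proved, stated in full; the proofs are below) =====
def Claim_equal_strongest_check_strength_py : Prop := ∀ (checks : List (List (String × String))), Dom_strongest_check_strength_py checks → Spec_strongest_check_strength_py checks (strongest_check_strength_py checks)

-- ===== LEMMAS AND PROOFS =====

/-- The rank A's `order` dict assigns to a normalized label. -/
def pvRank (l : String) : Int :=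
  if l = "effective" then 3 else if l = "weak" then 2 else if l = "absent" then 1 else 0

/-- A's loop body, expressed over the normalized label. -/
def pvStep (s : String × Int) (l : String) : String × Int :=
  if pvRank l > s.2 then (l, pvRank l) else s

theorem pvRank_eq (l : String) :
    (PySem.Dict.mk [("effective", (3:Int)), ("weak", 2), ("absent", 1), ("unknown", 0)]).getD l 0
      = pvRank l := by
  by_cases h1 : l = "effective" <;> by_cases h2 : l = "weak" <;>
    by_cases h3 : l = "absent" <;> by_cases h4 : l = "unknown"
  all_goals first
    | (subst_vars; simp_all [PySem.Dict.getD, PySem.Dict.get?_mk_cons, pvRank]; done)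
    | (simp [PySem.Dict.getD, PySem.Dict.get?_mk_cons, PySem.Dict.get?, pvRank,
        Ne.symm h1, Ne.symm h2, Ne.symm h3, Ne.symm h4, h1, h2, h3])

set_option maxHeartbeats 1000000 in
/-- Characterization of A's fold from an arbitrary state. -/
theorem pvFold_char (ls : List String) (b : String) (r : Int) :
    (ls.foldl pvStep (b, r)).1 =
      if "effective" ∈ ls ∧ r < 3 then "effective"
      else if "weak" ∈ ls ∧ r < 2 then "weak"
      else if "absent" ∈ ls ∧ r < 1 then "absent"
      else match ls with
           | [] => b
           | l :: _ => if r < 0 then l else b := by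
  induction ls generalizing b r with
  | nil => simp
  | cons l ls ih =>
    simp only [List.foldl_cons, List.mem_cons]
    by_cases h1 : l = "effective" <;> by_cases h2 : l = "weak" <;>
      by_cases h3 : l = "absent"
    all_goals (try (exfalso; simp_all; done))
    all_goals (simp only [pvStep, pvRank, h1, h2, h3])
    all_goals (norm_num)
    all_goals (split_ifs with hr <;> rw [ih] <;> clear ih <;> cases ls <;>
      split_ifs <;> simp_all <;> omega)

-- ===== VERDICT (by name: the statement is the Claim_ definition above) =====
set_option maxHeartbeats 1000000 in
theorem strongest_check_strength_py_spec : Claim_equal_strongest_check_strength_py := by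
  intro checks _
  unfold Spec_strongest_check_strength_py strongest_check_strength_py strongest_check_strength_py_alt
  have hfold : (checks.foldl (fun s row =>
      let cur := pvNormLabel row
      let rank := (PySem.Dict.mk [("effective", (3:Int)), ("weak", 2), ("absent", 1), ("unknown", 0)]).getD cur 0
      if rank > s.2 then (cur, rank) else s) ("unknown", -1))
      = ((checks.map pvNormLabel).foldl pvStep ("unknown", -1)) := by
    rw [List.foldl_map]
    congr 1
    funext s l
    simp [pvStep, pvRank_eq]
  simp only [hfold]
  rw [pvFold_char]
  by_cases hE : "effective" ∈ checks.map pvNormLabel <;>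
  by_cases hW : "weak" ∈ checks.map pvNormLabel <;>
  by_cases hA : "absent" ∈ checks.map pvNormLabel <;>
    simp only [List.find?, PySem.Set.contains] <;>
    simp [PySem.Set.mem_ofList, hE, hW, hA]
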